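-- pv_equiv track=rewrite | github.com/salmedina/InMind_Email | Server/extractor.py | findOrgEnd
-- ===== SOURCE A (Python) =====
-- def findOrgEnd(line,text,lineno):
-- 	i = lineno + 1
-- 	from_index = 0
-- 	while i < len(text):
-- 		if "Subject:" in text[i]:
-- 			return i
-- 		if (from_index == 0) and "From:" in text[i]:
-- 			from_index = i
-- 		i += 1
-- 	if from_index != 0:
-- 		return from_index
-- 	else:
-- 		return lineno + 1
-- ===== SOURCE B (Python) =====
-- def findOrgEnd(line, text, lineno):
--     n = len(text)
--     for i in range(lineno + 1, n):
--         if "Subject:" in text[i]: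
--             return i
--     for i in range(lineno + 1, n):
--         if "From:" in text[i]:
--             return i
--     return lineno + 1
-- ===== Notes on version B (the rewrite author's own statement) =====
-- stated objective: simpler
-- what changed: A's single interleaved while-loop with a from_index==0 sentinel is replaced by two plain sequential scans (first for 'Subject:', then for 'From:'), dropping the sentinel variable.
-- intended difference: When no scanned line contains 'Subject:' and the first scanned 'From:' line is at index 0 (so lineno+1<=0) and either lineno+1<0 or another 'From:' line exists later, A's zero-sentinel makes it skip that first match and return the second 'From:' index or lineno+1, while B returns 0, the index of the first 'From:' line, which is the intended answer. — e.g. on findOrgEnd("", ["From: a", "From: b"], -1): A returns 1, B returns 0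
import Mathlib
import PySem

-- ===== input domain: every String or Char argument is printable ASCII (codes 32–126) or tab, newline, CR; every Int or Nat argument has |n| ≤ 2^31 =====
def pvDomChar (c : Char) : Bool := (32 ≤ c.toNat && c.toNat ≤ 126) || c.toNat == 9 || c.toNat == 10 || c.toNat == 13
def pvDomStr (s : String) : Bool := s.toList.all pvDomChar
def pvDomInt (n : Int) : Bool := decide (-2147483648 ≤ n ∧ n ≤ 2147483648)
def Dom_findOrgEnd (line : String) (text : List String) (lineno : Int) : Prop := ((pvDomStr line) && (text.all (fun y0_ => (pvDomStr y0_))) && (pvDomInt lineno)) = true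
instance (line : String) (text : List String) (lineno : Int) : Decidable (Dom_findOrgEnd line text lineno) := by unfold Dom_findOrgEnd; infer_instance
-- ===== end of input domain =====

-- B replaces A's single interleaved sentinel-loop by two sequential scans (Subject first, then From);
-- B intentionally returns the first 'From:' index even when it is 0 (A's zero-sentinel skips it, see D_ below).

-- ===== PORT A =====
-- Python's 'sub in s' substring test (shared by both ports and D_)
def containsSub (needle s : String) : Bool := PySem.Str.isIn needle s

-- A's while-loop 'while i < len(text)' as recursion on the exact remaining iteration
-- count (len(text) - i); from_index records the first 'From:' line but uses 0 as 'not found'.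
def findOrgEndGo (text : List String) (lineno : Int) : Nat → Int → Int → Int
  | 0, _, from_index => if from_index ≠ 0 then from_index else lineno + 1
  | k + 1, i, from_index =>
    match PySem.List.pyGet? text i with
    | none => 0  -- Python IndexError here; excluded by Pre_findOrgEnd
    | some s =>
      if containsSub "Subject:" s then i
      else findOrgEndGo text lineno k (i + 1)
             (if from_index == 0 && containsSub "From:" s then i else from_index)

def findOrgEnd (line : String) (text : List String) (lineno : Int) : Int :=
  findOrgEndGo text lineno ((text.length : Int) - (lineno + 1)).toNat (lineno + 1) 0

-- ===== PORT B =====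
-- one 'for i in range(i0, len(text))' scan returning the first index whose line contains
-- needle; again recursion on the exact remaining iteration count.
def findFirstIdxGo (needle : String) (text : List String) : Nat → Int → Option Int
  | 0, _ => none
  | k + 1, i =>
    match PySem.List.pyGet? text i with
    | none => none  -- Python IndexError here; excluded by Pre_findOrgEnd
    | some s => if containsSub needle s then some i else findFirstIdxGo needle text k (i + 1)

def findFirstIdx (needle : String) (text : List String) (i : Int) : Option Int :=
  findFirstIdxGo needle text ((text.length : Int) - i).toNat i

def findOrgEnd_alt (line : String) (text : List String) (lineno : Int) : Int :=
  match findFirstIdx "Subject:" text (lineno + 1) with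
  | some i => i
  | none =>
    match findFirstIdx "From:" text (lineno + 1) with
    | some i => i
    | none => lineno + 1

-- ===== PRECONDITION & SPEC =====
-- Pre_ excludes exactly the inputs where A raises IndexError: lineno+1 below -len(text)
-- makes the very first access text[lineno+1] fall out of Python's negative-index range.
def Pre_findOrgEnd (line : String) (text : List String) (lineno : Int) : Prop :=
  -(text.length : Int) ≤ lineno + 1
instance (line : String) (text : List String) (lineno : Int) : Decidable (Pre_findOrgEnd line text lineno) := by unfold Pre_findOrgEnd; infer_instance

def pvWitness_findOrgEnd : String × List String × Int := ("", ["Subject: x"], 0)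

-- When no scanned line contains "Subject:" and the first scanned "From:" line is at index 0
-- (and either lineno+1 < 0 or another "From:" line exists later), A's zero-sentinel skips that
-- first match and returns the later "From:" index or lineno+1, while B returns 0, the index of
-- the first "From:" line, which is the intended answer.
def D_findOrgEnd (line : String) (text : List String) (lineno : Int) : Prop :=
  lineno < 0 ∧ containsSub "From:" text.headI ∧
  text.any (containsSub "Subject:") = false ∧
  (text.drop (lineno + 1 + text.length).toNat).any (containsSub "From:") = false ∧
  (lineno ≠ -1 ∨ text.tail.any (containsSub "From:"))
instance (line : String) (text : List String) (lineno : Int) : Decidable (D_findOrgEnd line text lineno) := by unfold D_findOrgEnd; infer_instance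

def Spec_findOrgEnd (line : String) (text : List String) (lineno : Int) (out : Int) : Prop :=
  ¬ D_findOrgEnd line text lineno → out = findOrgEnd_alt line text lineno
instance (line : String) (text : List String) (lineno : Int) (out : Int) : Decidable (Spec_findOrgEnd line text lineno out) := by unfold Spec_findOrgEnd; infer_instance

def pvDiffWitness_findOrgEnd : String × List String × Int := ("", ["From: a", "From: b"], -1)
def pvDiffWitnessOut_findOrgEnd : Int × Int := (1, 0)

-- ===== CLAIM (what is proved, stated in full; the proofs are below) =====
def Claim_unchanged_findOrgEnd : Prop := ∀ (line : String) (text : List String) (lineno : Int), Dom_findOrgEnd line text lineno → Pre_findOrgEnd line text lineno → Spec_findOrgEnd line text lineno (findOrgEnd line text lineno)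
def Claim_changed_findOrgEnd : Prop := Dom_findOrgEnd (pvDiffWitness_findOrgEnd.1) (pvDiffWitness_findOrgEnd.2.1) (pvDiffWitness_findOrgEnd.2.2) ∧ Pre_findOrgEnd (pvDiffWitness_findOrgEnd.1) (pvDiffWitness_findOrgEnd.2.1) (pvDiffWitness_findOrgEnd.2.2) ∧ D_findOrgEnd (pvDiffWitness_findOrgEnd.1) (pvDiffWitness_findOrgEnd.2.1) (pvDiffWitness_findOrgEnd.2.2) ∧ findOrgEnd (pvDiffWitness_findOrgEnd.1) (pvDiffWitness_findOrgEnd.2.1) (pvDiffWitness_findOrgEnd.2.2) = pvDiffWitnessOut_findOrgEnd.1 ∧ findOrgEnd_alt (pvDiffWitness_findOrgEnd.1) (pvDiffWitness_findOrgEnd.2.1) (pvDiffWitness_findOrgEnd.2.2) = pvDiffWitnessOut_findOrgEnd.2 ∧ pvDiffWitnessOut_findOrgEnd.1 ≠ pvDiffWitnessOut_findOrgEnd.2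
def Claim_exact_findOrgEnd : Prop := ∀ (line : String) (text : List String) (lineno : Int), Dom_findOrgEnd line text lineno → Pre_findOrgEnd line text lineno → D_findOrgEnd line text lineno → findOrgEnd line text lineno ≠ findOrgEnd_alt line text lineno

-- ===== LEMMAS AND PROOFS =====

theorem pyGet?_eq_some_getD {text : List String} {i : Int}
    (h1 : -(text.length : Int) ≤ i) (h2 : i < (text.length : Int)) :
    PySem.List.pyGet? text i = some (PySem.List.pyGetD text i "") := by
  cases h : PySem.List.pyGet? text i with
  | none =>
    exact absurd ((PySem.List.pyGet?_eq_none_iff _ _).1 h) (by simp [PySem.Raise.InRange]; omega)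
  | some s => simp [PySem.List.pyGetD, h]

theorem findFirstIdxGo_ge {needle : String} {text : List String} :
    ∀ (fuel : Nat) {i f : Int}, findFirstIdxGo needle text fuel i = some f → i ≤ f := by
  intro fuel
  induction fuel with
  | zero => intro i f h; simp [findFirstIdxGo] at h
  | succ k ih =>
    intro i f h
    simp only [findFirstIdxGo] at h
    cases hg : PySem.List.pyGet? text i with
    | none => rw [hg] at h; exact absurd h (by simp)
    | some s =>
      rw [hg] at h
      dsimp only at h
      by_cases hin : containsSub needle s = true
      · rw [if_pos hin] at h
        have : i = f := by injection h
        omega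
      · rw [if_neg hin] at h
        have := ih h; omega

theorem findFirstIdx_ge {needle : String} {text : List String} {i f : Int}
    (h : findFirstIdx needle text i = some f) : i ≤ f :=
  findFirstIdxGo_ge _ h

-- characterization of a full unsuccessful scan, under the no-IndexError bound
theorem findFirstIdxGo_none_iff {needle : String} {text : List String} :
    ∀ (fuel : Nat) {i : Int}, -(text.length : Int) ≤ i →
    fuel = ((text.length : Int) - i).toNat →
    (findFirstIdxGo needle text fuel i = none ↔
      ∀ j ∈ PySem.List.pyRange i (text.length : Int) 1,
        containsSub needle (PySem.List.pyGetD text j "") = false) := by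
  intro fuel
  induction fuel with
  | zero =>
    intro i hi hf
    rw [PySem.List.pyRange_one_eq_nil (by omega)]
    simp [findFirstIdxGo]
  | succ k ih =>
    intro i hi hf
    have hlt : i < (text.length : Int) := by omega
    rw [PySem.List.pyRange_one_cons hlt]
    simp only [findFirstIdxGo, pyGet?_eq_some_getD hi hlt]
    by_cases hin : containsSub needle (PySem.List.pyGetD text i "") = true
    · rw [if_pos hin]
      constructor
      · intro h; exact absurd h (by simp)
      · intro h
        have h0 := h i (by simp)
        rw [h0] at hin
        exact absurd hin (by simp)
    · rw [if_neg hin, ih (by omega) (by omega)]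
      rw [Bool.not_eq_true] at hin
      constructor
      · intro h j hj
        rcases List.mem_cons.1 hj with rfl | hj
        · exact hin
        · exact h j hj
      · intro h j hj
        exact h j (List.mem_cons_of_mem _ hj)

-- characterization of a successful scan
theorem findFirstIdxGo_some_iff {needle : String} {text : List String} :
    ∀ (fuel : Nat) {i f : Int}, -(text.length : Int) ≤ i →
    fuel = ((text.length : Int) - i).toNat →
    (findFirstIdxGo needle text fuel i = some f ↔
      (i ≤ f ∧ f < (text.length : Int) ∧
       containsSub needle (PySem.List.pyGetD text f "") = true ∧
       ∀ j ∈ PySem.List.pyRange i f 1,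
         containsSub needle (PySem.List.pyGetD text j "") = false)) := by
  intro fuel
  induction fuel with
  | zero =>
    intro i f hi hf
    simp only [findFirstIdxGo]
    constructor
    · intro h; exact absurd h (by simp)
    · rintro ⟨h1, h2, -, -⟩; exfalso; omega
  | succ k ih =>
    intro i f hi hf
    have hlt : i < (text.length : Int) := by omega
    simp only [findFirstIdxGo, pyGet?_eq_some_getD hi hlt]
    by_cases hin : containsSub needle (PySem.List.pyGetD text i "") = true
    · rw [if_pos hin]
      constructor
      · intro h
        have hif : i = f := by injection h
        subst hif
        exact ⟨le_refl i, hlt, hin, by rw [PySem.List.pyRange_one_eq_nil (by omega)]; simp⟩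
      · rintro ⟨h1, h2, h3, h4⟩
        by_cases hif : i = f
        · rw [hif]
        · exfalso
          have hmem : i ∈ PySem.List.pyRange i f 1 := by
            rw [PySem.List.mem_pyRange_one]; omega
          have h0 := h4 i hmem
          rw [h0] at hin
          exact absurd hin (by simp)
    · rw [if_neg hin, ih (by omega) (by omega)]
      rw [Bool.not_eq_true] at hin
      constructor
      · rintro ⟨h1, h2, h3, h4⟩
        refine ⟨by omega, h2, h3, ?_⟩
        intro j hj
        rw [PySem.List.mem_pyRange_one] at hj
        by_cases hji : j = i
        · rw [hji]; exact hin
        · exact h4 j (by rw [PySem.List.mem_pyRange_one]; omega)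
      · rintro ⟨h1, h2, h3, h4⟩
        have hif : i ≠ f := by
          intro hif
          rw [← hif] at h3
          rw [h3] at hin
          exact absurd hin (by simp)
        refine ⟨by omega, h2, h3, ?_⟩
        intro j hj
        rw [PySem.List.mem_pyRange_one] at hj
        exact h4 j (by rw [PySem.List.mem_pyRange_one]; omega)

theorem findFirstIdx_none_iff {needle : String} {text : List String} {i : Int}
    (hi : -(text.length : Int) ≤ i) :
    findFirstIdx needle text i = none ↔
      ∀ j ∈ PySem.List.pyRange i (text.length : Int) 1,
        containsSub needle (PySem.List.pyGetD text j "") = false :=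
  findFirstIdxGo_none_iff _ hi rfl

theorem findFirstIdx_some_iff {needle : String} {text : List String} {i f : Int}
    (hi : -(text.length : Int) ≤ i) :
    findFirstIdx needle text i = some f ↔
      (i ≤ f ∧ f < (text.length : Int) ∧
       containsSub needle (PySem.List.pyGetD text f "") = true ∧
       ∀ j ∈ PySem.List.pyRange i f 1,
         containsSub needle (PySem.List.pyGetD text j "") = false) :=
  findFirstIdxGo_some_iff _ hi rfl

-- A's loop with a nonzero from_index only searches for Subject
theorem loop_nonzero {text : List String} {lineno : Int} :
    ∀ (fuel : Nat) {i fi : Int}, -(text.length : Int) ≤ i →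
    fuel = ((text.length : Int) - i).toNat → fi ≠ 0 →
    findOrgEndGo text lineno fuel i fi =
      (findFirstIdxGo "Subject:" text fuel i).getD fi := by
  intro fuel
  induction fuel with
  | zero => intro i fi hi hf hfi; simp [findOrgEndGo, findFirstIdxGo, hfi]
  | succ k ih =>
    intro i fi hi hf hfi
    have hlt : i < (text.length : Int) := by omega
    simp only [findOrgEndGo, findFirstIdxGo, pyGet?_eq_some_getD hi hlt]
    by_cases hS : containsSub "Subject:" (PySem.List.pyGetD text i "") = true
    · rw [if_pos hS, if_pos hS]
      simp
    · rw [if_neg hS, if_neg hS,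
          if_neg (by simp [hfi] : ¬ ((fi == 0 && containsSub "From:" (PySem.List.pyGetD text i "")) = true))]
      exact ih (by omega) (by omega) hfi

-- A's loop with from_index = 0, characterized by B-style scans
theorem loop_zero {text : List String} {lineno : Int} :
    ∀ (fuel : Nat) {i : Int}, -(text.length : Int) ≤ i →
    fuel = ((text.length : Int) - i).toNat →
    findOrgEndGo text lineno fuel i 0 =
      (match findFirstIdxGo "Subject:" text fuel i with
      | some s => s
      | none =>
        match findFirstIdxGo "From:" text fuel i with
        | some f =>
          if f = 0 then
            match findFirstIdx "From:" text 1 with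
            | some g => g
            | none => lineno + 1
          else f
        | none => lineno + 1) := by
  intro fuel
  induction fuel with
  | zero => intro i hi hf; simp [findOrgEndGo, findFirstIdxGo]
  | succ k ih =>
    intro i hi hf
    have hlt : i < (text.length : Int) := by omega
    simp only [findOrgEndGo, findFirstIdxGo, pyGet?_eq_some_getD hi hlt]
    by_cases hS : containsSub "Subject:" (PySem.List.pyGetD text i "") = true
    · rw [if_pos hS, if_pos hS]
    · rw [if_neg hS, if_neg hS]
      by_cases hFr : containsSub "From:" (PySem.List.pyGetD text i "") = true
      · rw [if_pos hFr,
            if_pos (by rw [hFr]; decide : ((0 : Int) == 0 && containsSub "From:" (PySem.List.pyGetD text i "")) = true)]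
        by_cases hi0 : i = 0
        · subst hi0
          rw [ih (by omega) (by omega)]
          have hwr : findFirstIdxGo "From:" text k (0 + 1) = findFirstIdx "From:" text 1 := by
            unfold findFirstIdx
            congr 1
            omega
          rw [hwr]
          cases hsub : findFirstIdxGo "Subject:" text k (0 + 1) with
          | some s => rfl
          | none =>
            cases hF1 : findFirstIdx "From:" text 1 with
            | none => rfl
            | some g =>
              have hg : (1 : Int) ≤ g := by
                have := findFirstIdx_ge hF1; omega
              simp [show ¬ g = 0 by omega]
        · rw [loop_nonzero k (by omega) (by omega) hi0]
          cases hsub : findFirstIdxGo "Subject:" text k (i + 1) with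
          | some s => rfl
          | none =>
            simp only [Option.getD_none]
            rw [if_neg hi0]
      · rw [if_neg (by
          rw [show ((0 : Int) == 0) = true from by decide, Bool.true_and]
          exact hFr)]
        rw [ih (by omega) (by omega)]
        rw [if_neg hFr]


-- ===== bridges between the scan-index view of the ports and D_'s list view =====

theorem pyGetD_neg_eq (text : List String) {i : Int} {k : Nat} (hk : k < text.length)
    (hik : i + (text.length : Int) = (k : Int)) (hneg : i < 0) :
    PySem.List.pyGetD text i "" = text[k] := by
  have h3 : i = -(((text.length - k : Nat) : Nat) : Int) := by omega
  rw [h3, PySem.List.pyGetD_neg_natCast text (text.length - k) "" (by omega) (by omega)]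
  congr 1
  omega

theorem scan_all_iff (needle : String) (text : List String) (a : Int)
    (h1 : -(text.length : Int) ≤ a) (h2 : a ≤ 0) :
    (∀ j ∈ PySem.List.pyRange a (text.length : Int) 1,
        containsSub needle (PySem.List.pyGetD text j "") = false) ↔
      ∀ s ∈ text, containsSub needle s = false := by
  constructor
  · intro h s hs
    obtain ⟨k, hk, rfl⟩ := List.mem_iff_getElem.1 hs
    have hj := h (k : Int) (by rw [PySem.List.mem_pyRange_one]; omega)
    rw [PySem.List.pyGetD_eq_getElem text "" (by omega) (by omega)] at hj
    simpa using hj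
  · intro h j hj
    rw [PySem.List.mem_pyRange_one] at hj
    exact h _ (PySem.List.pyGetD_mem text "" ⟨by omega, hj.2⟩)

theorem scan_pre_iff (needle : String) (text : List String) (a : Int)
    (h1 : -(text.length : Int) ≤ a) :
    (∀ j ∈ PySem.List.pyRange a 0 1,
        containsSub needle (PySem.List.pyGetD text j "") = false) ↔
      ∀ s ∈ text.drop (a + text.length).toNat, containsSub needle s = false := by
  constructor
  · intro h s hs
    obtain ⟨m, hm, rfl⟩ := List.mem_iff_getElem.1 hs
    rw [List.length_drop] at hm
    rw [List.getElem_drop]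
    have hj := h (((a + text.length).toNat + m : Nat) - (text.length : Int))
      (by rw [PySem.List.mem_pyRange_one]; push_cast; omega)
    rw [pyGetD_neg_eq text (k := (a + text.length).toNat + m) (by omega)
      (by push_cast; omega) (by push_cast; omega)] at hj
    exact hj
  · intro h j hj
    rw [PySem.List.mem_pyRange_one] at hj
    rw [pyGetD_neg_eq text (k := (j + text.length).toNat) (by omega) (by omega) hj.2]
    apply h
    rw [List.mem_iff_getElem]
    refine ⟨(j + text.length).toNat - (a + text.length).toNat,
      by rw [List.length_drop]; omega, ?_⟩
    rw [List.getElem_drop]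
    congr 1
    omega

theorem scan_tail_iff (needle : String) (text : List String) :
    (∃ j ∈ PySem.List.pyRange 1 (text.length : Int) 1,
        containsSub needle (PySem.List.pyGetD text j "") = true) ↔
      ∃ s ∈ text.tail, containsSub needle s = true := by
  rw [← List.drop_one]
  constructor
  · rintro ⟨j, hj, hjt⟩
    rw [PySem.List.mem_pyRange_one] at hj
    rw [PySem.List.pyGetD_eq_getElem text "" (by omega) (by omega)] at hjt
    refine ⟨text[j.toNat]'(by omega), ?_, hjt⟩
    rw [List.mem_iff_getElem]
    refine ⟨j.toNat - 1, by rw [List.length_drop]; omega, ?_⟩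
    rw [List.getElem_drop]
    congr 1
    omega
  · rintro ⟨s, hs, hst⟩
    obtain ⟨m, hm, rfl⟩ := List.mem_iff_getElem.1 hs
    rw [List.length_drop] at hm
    rw [List.getElem_drop] at hst
    refine ⟨((1 + m : Nat) : Int), by rw [PySem.List.mem_pyRange_one]; push_cast; omega, ?_⟩
    rw [PySem.List.pyGetD_eq_getElem text "" (by omega) (by push_cast; omega)]
    have hidx : (((1 + m : Nat) : Int)).toNat = 1 + m := by omega
    simpa [hidx] using hst

theorem pyGetD_zero_headI (text : List String) (hne : text ≠ []) :
    PySem.List.pyGetD text 0 "" = text.headI := by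
  cases text with
  | nil => exact absurd rfl hne
  | cons x xs => rw [PySem.List.pyGetD_zero_cons]; rfl

-- ===== VERDICT (by name: the statement is the Claim_ definition above) =====
theorem findOrgEnd_spec : Claim_unchanged_findOrgEnd := by
  intro line text lineno hdom hpre
  unfold Spec_findOrgEnd
  intro hnd
  have hpre' : -(text.length : Int) ≤ lineno + 1 := hpre
  unfold findOrgEnd findOrgEnd_alt
  rw [loop_zero _ hpre' rfl]
  have e1 : findFirstIdxGo "Subject:" text ((text.length : Int) - (lineno + 1)).toNat (lineno + 1)
      = findFirstIdx "Subject:" text (lineno + 1) := rfl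
  have e2 : findFirstIdxGo "From:" text ((text.length : Int) - (lineno + 1)).toNat (lineno + 1)
      = findFirstIdx "From:" text (lineno + 1) := rfl
  rw [e1, e2]
  cases hS : findFirstIdx "Subject:" text (lineno + 1) with
  | some s => rfl
  | none =>
    cases hF : findFirstIdx "From:" text (lineno + 1) with
    | none => rfl
    | some f =>
      by_cases hf0 : f = 0
      · rw [hf0] at hF ⊢
        dsimp only
        rw [if_pos rfl]
        obtain ⟨h1, h2, h3, h4⟩ := (findFirstIdx_some_iff hpre').1 hF
        have hsn := (findFirstIdx_none_iff hpre').1 hS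
        by_cases h10 : lineno + 1 = 0
        · cases hF1 : findFirstIdx "From:" text 1 with
          | none => dsimp only; exact h10
          | some g =>
            exfalso
            apply hnd
            unfold D_findOrgEnd
            obtain ⟨g1, g2, g3, g4⟩ :=
              (findFirstIdx_some_iff (show -(text.length : Int) ≤ 1 by omega)).1 hF1
            have hne : text ≠ [] := by intro he; rw [he] at h2; simp at h2
            refine ⟨by omega, by rw [← pyGetD_zero_headI text hne]; exact h3, ?_, ?_, Or.inr ?_⟩
            · rw [List.any_eq_false]
              intro s hs
              simp only [Bool.not_eq_true]
              exact (scan_all_iff _ text _ hpre' (by omega)).1 hsn s hs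
            · rw [List.any_eq_false]
              intro s hs
              simp only [Bool.not_eq_true]
              exact (scan_pre_iff _ text _ hpre').1 h4 s hs
            · rw [List.any_eq_true]
              obtain ⟨s, hs, hsF⟩ := (scan_tail_iff _ text).1
                ⟨g, by rw [PySem.List.mem_pyRange_one]; omega, g3⟩
              exact ⟨s, hs, hsF⟩
        · exfalso
          apply hnd
          unfold D_findOrgEnd
          have hne : text ≠ [] := by intro he; rw [he] at h2; simp at h2
          refine ⟨by omega, by rw [← pyGetD_zero_headI text hne]; exact h3, ?_, ?_, Or.inl (by omega)⟩
          · rw [List.any_eq_false]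
            intro s hs
            simp only [Bool.not_eq_true]
            exact (scan_all_iff _ text _ hpre' (by omega)).1 hsn s hs
          · rw [List.any_eq_false]
            intro s hs
            simp only [Bool.not_eq_true]
            exact (scan_pre_iff _ text _ hpre').1 h4 s hs
      · dsimp only
        rw [if_neg hf0]

theorem findOrgEnd_changed : Claim_changed_findOrgEnd := by
  unfold Claim_changed_findOrgEnd; decide

theorem findOrgEnd_tight : Claim_exact_findOrgEnd := by
  intro line text lineno hdom hpre hD
  unfold D_findOrgEnd at hD
  obtain ⟨hl0, hF0, hSany, hFany, hlast⟩ := hD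
  have hpre' : -(text.length : Int) ≤ lineno + 1 := hpre
  have hne : text ≠ [] := by
    intro he
    rw [he] at hF0
    exact absurd hF0 (by decide)
  have hlen : 0 < (text.length : Int) := by
    have := List.length_pos_of_ne_nil hne; omega
  rw [List.any_eq_false] at hSany hFany
  have hSall : ∀ s ∈ text, containsSub "Subject:" s = false := by
    intro s hs
    have := hSany s hs
    simpa using this
  have hFneg : ∀ s ∈ text.drop (lineno + 1 + text.length).toNat,
      containsSub "From:" s = false := by
    intro s hs
    have := hFany s hs
    simpa using this
  have hS : findFirstIdx "Subject:" text (lineno + 1) = none :=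
    (findFirstIdx_none_iff hpre').2 ((scan_all_iff _ text _ hpre' (by omega)).2 hSall)
  have hF : findFirstIdx "From:" text (lineno + 1) = some 0 :=
    (findFirstIdx_some_iff hpre').2 ⟨by omega, hlen,
      by rw [pyGetD_zero_headI text hne]; exact hF0,
      (scan_pre_iff _ text _ hpre').2 hFneg⟩
  unfold findOrgEnd findOrgEnd_alt
  rw [loop_zero _ hpre' rfl]
  have e1 : findFirstIdxGo "Subject:" text ((text.length : Int) - (lineno + 1)).toNat (lineno + 1)
      = findFirstIdx "Subject:" text (lineno + 1) := rfl
  have e2 : findFirstIdxGo "From:" text ((text.length : Int) - (lineno + 1)).toNat (lineno + 1)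
      = findFirstIdx "From:" text (lineno + 1) := rfl
  rw [e1, e2, hS, hF]
  dsimp only
  rw [if_pos rfl]
  cases hF1 : findFirstIdx "From:" text 1 with
  | some g =>
    have hg := findFirstIdx_ge hF1
    simp only []
    omega
  | none =>
    dsimp only
    rcases hlast with h | hex
    · omega
    · exfalso
      rw [List.any_eq_true] at hex
      obtain ⟨s, hs, hsF⟩ := hex
      obtain ⟨j, hj, hjF⟩ := (scan_tail_iff "From:" text).2 ⟨s, hs, hsF⟩
      have h0 := (findFirstIdx_none_iff (show -(text.length : Int) ≤ 1 by omega)).1 hF1 j hj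
      rw [h0] at hjF
      exact absurd hjF (by simp)
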